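-- pv_equiv track=rewrite | github.com/tomas-skalicky/interview_puzzles | src/main/python/com/skalicky/python/interviewpuzzles/count_ways_how_to_get_from_one_to_another_matrix_corner_with_barriers.py | paths_through_maze_traversing_without_memory
-- ===== SOURCE A (Python) =====
-- from typing import Deque, List, Set, Tuple
--
-- def paths_through_maze_traversing_without_memory(maze: List[List[int]]) -> int:
--     row_count: int = len(maze)
--     if row_count == 0:
--         return 0
--     else:
--         column_count: int = len(maze[0])
--         if column_count == 0:
--             return 0
--         else:
--             max_row_index: int = row_count - 1
--             max_column_index: int = column_count - 1
--             counter: int = 0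
--
--             last_positions: List[Tuple[int, int]] = [(0, 0)]
--             while len(last_positions) > 0:
--                 current_row_index, current_column_index = last_positions.pop()
--                 if current_row_index == max_row_index and current_column_index == max_column_index:
--                     counter += 1
--                 else:
--                     if current_row_index < max_row_index and maze[current_row_index + 1][current_column_index] == 0:
--                         last_positions.append((current_row_index + 1, current_column_index))
--                     if current_column_index < max_column_index and maze[current_row_index][
--                         current_column_index + 1] == 0:
--                         last_positions.append((current_row_index, current_column_index + 1))
--             return counter
-- ===== SOURCE B (Python) =====
-- from typing import List
--
--
-- def paths_through_maze_traversing_without_memory(maze: List[List[int]]) -> int: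
--     # Bottom-up dynamic programming over rows instead of the exhaustive stack-based
--     # path enumeration: below[c] = number of down/right paths from (r+1, c) to
--     # the bottom-right corner; cur is the same for row r, built right-to-left.
--     if len(maze) == 0 or len(maze[0]) == 0:
--         return 0
--     row_count = len(maze)
--     column_count = len(maze[0])
--     below = [0] * column_count
--     for r in range(row_count - 1, -1, -1):
--         cur = [0] * column_count
--         for c in range(column_count - 1, -1, -1):
--             if r == row_count - 1 and c == column_count - 1:
--                 cur[c] = 1
--             else:
--                 down = below[c] if r + 1 < row_count and maze[r + 1][c] == 0 else 0
--                 right = cur[c + 1] if c + 1 < column_count and maze[r][c + 1] == 0 else 0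
--                 cur[c] = down + right
--         below = cur
--     return below[0]
-- ===== Notes on version B (the rewrite author's own statement) =====
-- stated objective: alternative
-- what changed: Replaced the explicit-stack DFS that re-walks every individual down/right path with a bottom-up dynamic-programming pass keeping one rolling row of path counts (cur[c] = down + right).
-- outside the precondition, e.g. on paths_through_maze_traversing_without_memory([[0, 1], [1]]): A returns 0, B raises IndexError
import Mathlib
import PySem

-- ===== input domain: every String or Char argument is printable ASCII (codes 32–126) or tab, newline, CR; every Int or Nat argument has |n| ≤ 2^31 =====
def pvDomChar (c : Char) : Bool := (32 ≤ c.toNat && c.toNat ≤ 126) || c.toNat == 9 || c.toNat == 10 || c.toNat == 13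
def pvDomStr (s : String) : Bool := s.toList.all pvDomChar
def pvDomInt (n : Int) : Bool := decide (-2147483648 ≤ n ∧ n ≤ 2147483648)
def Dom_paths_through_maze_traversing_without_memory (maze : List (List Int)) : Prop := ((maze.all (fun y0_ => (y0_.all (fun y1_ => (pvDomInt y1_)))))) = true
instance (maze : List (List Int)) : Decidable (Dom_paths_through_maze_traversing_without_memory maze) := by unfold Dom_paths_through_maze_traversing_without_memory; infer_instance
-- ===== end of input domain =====

-- B replaces A's exhaustive stack-based path enumeration by a bottom-up rolling-row
-- dynamic program (objective: alternative algorithm of the same measured cost).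


-- ===== PORT A =====
-- maze[r][c]; exact on Pre_ (rows cover the first column_count columns): there every
-- access the ports perform is in range, so the default is never used.
def pvCell (maze : List (List Int)) (r c : Nat) : Int :=
  (maze.getD r []).getD c 1

-- termination measure for the work-stack loop (proof-only helper, cited by decreasing_by)
def pvMeasure (mr mc : Nat) (stack : List (Nat × Nat)) : Nat :=
  (stack.map (fun p => 3 ^ ((mr - p.1) + (mc - p.2)))).sum

theorem pvPow3_pos (e : Nat) : 0 < 3 ^ e := Nat.pow_pos (by norm_num)

-- the while-loop of A: stack head = Python list end (append = cons, pop = head)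
def pvLoopA (maze : List (List Int)) (mr mc : Nat) (stack : List (Nat × Nat)) (counter : Int) : Int :=
  match stack with
  | [] => counter
  | (r, c) :: rest =>
    if r = mr ∧ c = mc then
      pvLoopA maze mr mc rest (counter + 1)
    else
      let rest1 := if r < mr ∧ pvCell maze (r + 1) c = 0 then (r + 1, c) :: rest else rest
      let rest2 := if c < mc ∧ pvCell maze r (c + 1) = 0 then (r, c + 1) :: rest1 else rest1
      pvLoopA maze mr mc rest2 counter
termination_by pvMeasure mr mc stack
decreasing_by
  · simp only [pvMeasure, List.map_cons, List.sum_cons]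
    have := pvPow3_pos ((mr - r) + (mc - c)); omega
  · simp only [pvMeasure]
    split_ifs with h1 h2 h2 <;> simp only [List.map_cons, List.sum_cons]
    · obtain ⟨hc, -⟩ := h1; obtain ⟨hr, -⟩ := h2
      have ha : mr - r + (mc - (c + 1)) = (mr - r) + (mc - c) - 1 := by omega
      have hb : mr - (r + 1) + (mc - c) = (mr - r) + (mc - c) - 1 := by omega
      have h3 : (3 : Nat) ^ ((mr - r) + (mc - c) - 1) * 3 = 3 ^ ((mr - r) + (mc - c)) := by
        rw [← pow_succ]; congr 1; omega
      have hp := pvPow3_pos ((mr - r) + (mc - c) - 1)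
      rw [ha, hb]; omega
    · obtain ⟨hc, -⟩ := h1
      have : (3 : Nat) ^ (mr - r + (mc - (c + 1))) < 3 ^ (mr - r + (mc - c)) :=
        Nat.pow_lt_pow_right (by norm_num) (by omega)
      omega
    · obtain ⟨hr, -⟩ := h2
      have : (3 : Nat) ^ (mr - (r + 1) + (mc - c)) < 3 ^ (mr - r + (mc - c)) :=
        Nat.pow_lt_pow_right (by norm_num) (by omega)
      omega
    · have := pvPow3_pos ((mr - r) + (mc - c)); omega

def paths_through_maze_traversing_without_memory (maze : List (List Int)) : Int :=
  if maze.length = 0 then 0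
  else
    let columnCount := (maze.headD []).length
    if columnCount = 0 then 0
    else pvLoopA maze (maze.length - 1) (columnCount - 1) [(0, 0)] 0

-- ===== PORT B =====
-- inner loop of B: builds the k rightmost entries of cur (columns mc+1-k .. mc), head = leftmost
def pvRowB (maze : List (List Int)) (mr mc r : Nat) (below : List Int) : Nat → List Int
  | 0 => []
  | k + 1 =>
    let c := mc - k
    let rest := pvRowB maze mr mc r below k
    let v :=
      if r = mr ∧ c = mc then (1 : Int)
      else
        (if r < mr ∧ pvCell maze (r + 1) c = 0 then below.getD c 0 else 0) +
        (if c < mc ∧ pvCell maze r (c + 1) = 0 then rest.headD 0 else 0)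
    v :: rest

-- outer loop of B: k rows processed bottom-up; result is "below" after those rows
def pvRowsB (maze : List (List Int)) (mr mc : Nat) : Nat → List Int
  | 0 => List.replicate (mc + 1) 0
  | k + 1 => pvRowB maze mr mc (mr - k) (pvRowsB maze mr mc k) (mc + 1)

def paths_through_maze_traversing_without_memory_alt (maze : List (List Int)) : Int :=
  if maze.length = 0 then 0
  else
    let columnCount := (maze.headD []).length
    if columnCount = 0 then 0
    else (pvRowsB maze (maze.length - 1) (columnCount - 1) maze.length).headD 0

-- ===== PRECONDITION & SPEC =====
-- Pre_ excludes ragged mazes whose first row is nonempty and some row is shorter than it: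
-- there the Python programs can hit an out-of-range maze[r][c] and raise IndexError.
def Pre_paths_through_maze_traversing_without_memory (maze : List (List Int)) : Prop :=
  maze.headD [] = [] ∨ ∀ row ∈ maze, (maze.headD []).length ≤ row.length
instance (maze : List (List Int)) : Decidable (Pre_paths_through_maze_traversing_without_memory maze) := by
  unfold Pre_paths_through_maze_traversing_without_memory; infer_instance

def pvWitness_paths_through_maze_traversing_without_memory : List (List Int) :=
  [[0, 0, 1], [0, 1, 0], [0, 0, 0]]

def Spec_paths_through_maze_traversing_without_memory (maze : List (List Int)) (out : Int) : Prop := out = paths_through_maze_traversing_without_memory_alt maze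
instance (maze : List (List Int)) (out : Int) : Decidable (Spec_paths_through_maze_traversing_without_memory maze out) := by unfold Spec_paths_through_maze_traversing_without_memory; infer_instance

-- ===== CLAIM (what is proved, stated in full; the proofs are below) =====
def Claim_equal_paths_through_maze_traversing_without_memory : Prop := ∀ (maze : List (List Int)), Dom_paths_through_maze_traversing_without_memory maze → Pre_paths_through_maze_traversing_without_memory maze → Spec_paths_through_maze_traversing_without_memory maze (paths_through_maze_traversing_without_memory maze)

-- ===== LEMMAS AND PROOFS =====
-- number of admissible down/right paths from (r, c) to (mr, mc)
def pvN (maze : List (List Int)) (mr mc r c : Nat) : Int :=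
  if r = mr ∧ c = mc then 1
  else
    (if r < mr ∧ pvCell maze (r + 1) c = 0 then pvN maze mr mc (r + 1) c else 0) +
    (if c < mc ∧ pvCell maze r (c + 1) = 0 then pvN maze mr mc r (c + 1) else 0)
termination_by (mr - r) + (mc - c)
decreasing_by all_goals omega

theorem pvN_below (maze : List (List Int)) (mr mc : Nat) :
    ∀ d c, mc - c ≤ d → pvN maze mr mc (mr + 1) c = 0 := by
  intro d
  induction d with
  | zero =>
    intro c hc
    rw [pvN]
    simp only [show ¬(mr + 1 = mr ∧ c = mc) by omega, if_false]
    simp only [show ¬(mr + 1 < mr ∧ pvCell maze (mr + 1 + 1) c = 0) by omega, if_false]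
    simp only [show ¬(c < mc ∧ pvCell maze (mr + 1) (c + 1) = 0) by omega, if_false]
    norm_num
  | succ d ih =>
    intro c hc
    rw [pvN]
    simp only [show ¬(mr + 1 = mr ∧ c = mc) by omega, if_false]
    simp only [show ¬(mr + 1 < mr ∧ pvCell maze (mr + 1 + 1) c = 0) by omega, if_false]
    rw [ih (c + 1) (by omega)]
    simp

theorem pvLoopA_sum (maze : List (List Int)) (mr mc : Nat) :
    ∀ stack counter, pvLoopA maze mr mc stack counter
      = counter + (stack.map (fun p => pvN maze mr mc p.1 p.2)).sum := by
  intro stack counter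
  fun_induction pvLoopA maze mr mc stack counter with
  | case1 counter => simp
  | case2 counter r c rest h ih =>
    simp only [List.map_cons, List.sum_cons]
    rw [ih, pvN]
    rw [if_pos h]; ring
  | case3 counter r c rest h rest1 rest2 ih =>
    simp only [List.map_cons, List.sum_cons]
    rw [ih, pvN]
    simp only [rest2, rest1]
    rw [if_neg h]
    split_ifs with h1 h2 h2 <;> simp <;> ring

theorem pvRowB_getD (maze : List (List Int)) (mr mc r : Nat) (below : List Int)
    (hb : ∀ c, c ≤ mc → below.getD c 0 = pvN maze mr mc (r + 1) c) :
    ∀ k, k ≤ mc + 1 → ∀ i, i < k →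
      (pvRowB maze mr mc r below k).getD i 0 = pvN maze mr mc r (mc + 1 - k + i) := by
  intro k
  induction k with
  | zero => omega
  | succ k ih =>
    intro hk i hi
    match i with
    | Nat.succ j =>
      simp only [pvRowB, List.getD_cons_succ]
      rw [ih (by omega) j (by omega)]
      congr 1; omega
    | 0 =>
      simp only [pvRowB, List.getD_cons_zero]
      have hc : mc + 1 - (k + 1) + 0 = mc - k := by omega
      rw [hc, pvN]
      by_cases hgoal : r = mr ∧ mc - k = mc
      · simp [hgoal]
      · simp only [hgoal, if_false]
        congr 1
        · split_ifs with h1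
          · exact (hb (mc - k) (by omega)).symm ▸ rfl
          · rfl
        · split_ifs with h2
          · have hk1 : 1 ≤ k := by omega
            have hh : (pvRowB maze mr mc r below k).headD 0
                = (pvRowB maze mr mc r below k).getD 0 0 := by
              cases hx : pvRowB maze mr mc r below k with
              | nil => simp
              | cons a l => simp
            rw [hh, ih (by omega) 0 (by omega)]
            congr 1; omega
          · rfl

theorem pvRowsB_getD (maze : List (List Int)) (mr mc : Nat) :
    ∀ k, k ≤ mr + 1 → ∀ c, c ≤ mc →
      (pvRowsB maze mr mc k).getD c 0 = pvN maze mr mc (mr + 1 - k) c := by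
  intro k
  induction k with
  | zero =>
    intro _ c hc
    have hrep : (List.replicate (mc + 1) (0 : Int)).getD c 0 = 0 := by
      simp [List.getD]
    simp only [pvRowsB, Nat.sub_zero]
    rw [hrep]
    exact (pvN_below maze mr mc mc c (by omega)).symm
  | succ k ih =>
    intro hk c hc
    simp only [pvRowsB]
    have hb : ∀ c', c' ≤ mc →
        (pvRowsB maze mr mc k).getD c' 0 = pvN maze mr mc ((mr - k) + 1) c' := by
      intro c' hc'
      rw [ih (by omega) c' hc']
      congr 1; omega
    rw [pvRowB_getD maze mr mc (mr - k) (pvRowsB maze mr mc k) hb (mc + 1) (by omega) c (by omega)]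
    congr 1 <;> omega

-- ===== VERDICT (by name: the statement is the Claim_ definition above) =====
theorem paths_through_maze_traversing_without_memory_spec : Claim_equal_paths_through_maze_traversing_without_memory := by
  intro maze _ _
  unfold Spec_paths_through_maze_traversing_without_memory
  unfold paths_through_maze_traversing_without_memory paths_through_maze_traversing_without_memory_alt
  cases maze with
  | nil => rfl
  | cons row rows =>
    simp only [List.headD_cons, List.length_cons]
    have h0 : ¬(rows.length + 1 = 0) := by omega
    simp only [h0, if_false]
    by_cases h1 : row.length = 0
    · simp [h1]
    · simp only [h1, if_false]
      rw [pvLoopA_sum]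
      have hrows := pvRowsB_getD (row :: rows) (rows.length + 1 - 1) (row.length - 1)
        (rows.length + 1) (by omega) 0 (by omega)
      have hh : (pvRowsB (row :: rows) (rows.length + 1 - 1) (row.length - 1) (rows.length + 1)).headD 0
          = (pvRowsB (row :: rows) (rows.length + 1 - 1) (row.length - 1) (rows.length + 1)).getD 0 0 := by
        cases hx : pvRowsB (row :: rows) (rows.length + 1 - 1) (row.length - 1) (rows.length + 1) with
        | nil => simp
        | cons a l => simp
      rw [hh, hrows]
      have he : rows.length + 1 - 1 + 1 - (rows.length + 1) = 0 := by omega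
      rw [he]
      simp
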